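-- pv_equiv track=rewrite | github.com/Tianyi-Fu/Context-Aware-Disambiguation | main.py | _best_by_count
-- ===== SOURCE A (Python) =====
-- from typing import Dict, Any, List, Tuple, Optional, Union
--
-- def _best_by_count(counts: Dict[str, int]) -> Optional[str]:
--     if not counts:
--         return None
--     max_v = max(counts.values()) if counts else 0
--     if max_v <= 0:
--         return None
--     best = sorted([k for k, v in counts.items() if v == max_v])
--     return best[0] if best else None
-- ===== SOURCE B (Python) =====
-- def _best_by_count(counts):
--     best_key = None
--     best_val = 0
--     for k, v in counts.items():
--         if v <= 0:
--             continue
--         if v > best_val: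
--             best_key, best_val = k, v
--         elif v == best_val and k < best_key:
--             best_key = k
--     return best_key
-- ===== Notes on version B (the rewrite author's own statement) =====
-- stated objective: alternative
-- what changed: Replaced A's three passes (max over values, filter to max-count keys, sort and take head) by a single fold keeping the best (key, value) pair, merging the positivity check and lexicographic tie-break into the loop; avoids the sort but measured speedup is below 1.5x, so no speed claim.
import Mathlib
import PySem

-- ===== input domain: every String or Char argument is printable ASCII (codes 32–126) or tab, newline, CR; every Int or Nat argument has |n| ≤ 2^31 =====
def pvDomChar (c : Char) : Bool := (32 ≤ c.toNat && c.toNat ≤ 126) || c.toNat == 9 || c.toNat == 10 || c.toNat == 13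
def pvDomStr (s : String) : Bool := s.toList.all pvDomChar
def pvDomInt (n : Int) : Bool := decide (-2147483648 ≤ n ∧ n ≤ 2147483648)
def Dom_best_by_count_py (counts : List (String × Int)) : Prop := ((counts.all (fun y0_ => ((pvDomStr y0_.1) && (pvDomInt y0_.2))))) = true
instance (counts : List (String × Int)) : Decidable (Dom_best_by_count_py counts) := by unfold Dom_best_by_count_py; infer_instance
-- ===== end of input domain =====

-- B changes A's three passes (max, filter, sort-and-head) into one fold keeping the best pair; return value only, no mutation.

-- ===== PORT A =====
-- literal transliteration of A: empty guard; max_v = max(values) (guarded 'if counts else 0');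
-- if max_v <= 0 return None; sort the keys whose value equals max_v; return best[0] if best else None
def best_by_count_py (counts : List (String × Int)) : Option String :=
  if counts = [] then none
  else
    let max_v : Int := if counts = [] then 0 else ((PySem.List.max? (counts.map Prod.snd) (fun v => v)).getD 0)
    if max_v ≤ 0 then none
    else
      let best := PySem.List.sorted ((counts.filter (fun p => decide (p.2 = max_v))).map Prod.fst) (fun k => k) false
      match best with
      | [] => none
      | b :: _ => some b

-- ===== PORT B =====
-- B-side helper: one iteration of Source B's loop body over the state (best_key, best_val)
def bbcStep (acc : Option String × Int) (kv : String × Int) : Option String × Int :=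
  if kv.2 ≤ 0 then acc
  else if acc.2 < kv.2 then (some kv.1, kv.2)
  else
    match acc.1 with
    | some b => if kv.2 = acc.2 ∧ kv.1 < b then (some kv.1, acc.2) else acc
    | none => acc  -- unreachable in Source B: best_key is None only while best_val = 0 < v

def best_by_count_py_alt (counts : List (String × Int)) : Option String :=
  (counts.foldl bbcStep (none, 0)).1

-- ===== PRECONDITION & SPEC =====
def Spec_best_by_count_py (counts : List (String × Int)) (out : Option String) : Prop := out = best_by_count_py_alt counts
instance (counts : List (String × Int)) (out : Option String) : Decidable (Spec_best_by_count_py counts out) := by unfold Spec_best_by_count_py; infer_instance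

-- ===== CLAIM (what is proved, stated in full; the proofs are below) =====
def Claim_equal_best_by_count_py : Prop := ∀ (counts : List (String × Int)), Dom_best_by_count_py counts → Spec_best_by_count_py counts (best_by_count_py counts)

-- ===== LEMMAS AND PROOFS =====

-- invariant of Source B's fold: best_val is nonnegative and bounds every value seen;
-- best_key is none exactly while best_val = 0, and otherwise names the
-- lexicographically smallest key among the pairs carrying the value best_val.
theorem bbc_fold_inv (l : List (String × Int)) :
    0 ≤ (l.foldl bbcStep (none, 0)).2 ∧
    (∀ p ∈ l, p.2 ≤ (l.foldl bbcStep (none, 0)).2) ∧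
    ((l.foldl bbcStep (none, 0)).2 = 0 → (l.foldl bbcStep (none, 0)).1 = none) ∧
    (0 < (l.foldl bbcStep (none, 0)).2 →
      ∃ k, (l.foldl bbcStep (none, 0)).1 = some k ∧
        (k, (l.foldl bbcStep (none, 0)).2) ∈ l ∧
        ∀ p ∈ l, p.2 = (l.foldl bbcStep (none, 0)).2 → k ≤ p.1) := by
  induction l using List.reverseRecOn with
  | nil => simp
  | append_singleton l p ih =>
    obtain ⟨h0, hle, hz, hpos⟩ := ih
    rw [List.foldl_append]
    set s := l.foldl bbcStep (none, 0) with hs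
    obtain ⟨k, v⟩ := p
    by_cases hv : v ≤ 0
    · have hstep : List.foldl bbcStep s [(k, v)] = s := by
        simp [bbcStep, hv]
      rw [hstep]
      refine ⟨h0, ?_, hz, ?_⟩
      · intro q hq
        rcases List.mem_append.1 hq with hq | hq
        · exact hle q hq
        · rw [List.mem_singleton] at hq; subst hq
          exact le_trans hv h0
      · intro hp
        obtain ⟨k0, hk0, hmem, hmin⟩ := hpos hp
        refine ⟨k0, hk0, List.mem_append_left _ hmem, ?_⟩
        intro q hq hq2
        rcases List.mem_append.1 hq with hq | hq
        · exact hmin q hq hq2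
        · rw [List.mem_singleton] at hq; subst hq
          have hv2 : v = s.2 := hq2
          omega
    · push Not at hv
      by_cases hlt : s.2 < v
      · have hstep : List.foldl bbcStep s [(k, v)] = (some k, v) := by
          simp [bbcStep, not_le.2 hv, hlt]
        rw [hstep]
        refine ⟨by omega, ?_, by omega, ?_⟩
        · intro q hq
          rcases List.mem_append.1 hq with hq | hq
          · exact le_trans (hle q hq) (le_of_lt hlt)
          · rw [List.mem_singleton] at hq; subst hq
            exact le_rfl
        · intro _
          refine ⟨k, rfl, List.mem_append_right _ (by simp), ?_⟩
          intro q hq hq2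
          rcases List.mem_append.1 hq with hq | hq
          · have hv2 : q.2 = v := hq2
            have := hle q hq
            omega
          · rw [List.mem_singleton] at hq; subst hq
            exact le_rfl
      · push Not at hlt
        have hs2 : 0 < s.2 := lt_of_lt_of_le hv hlt
        obtain ⟨b, hb, hbmem, hbmin⟩ := hpos hs2
        by_cases hcond : v = s.2 ∧ k < b
        · have hstep : List.foldl bbcStep s [(k, v)] = (some k, s.2) := by
            show bbcStep s (k, v) = (some k, s.2)
            unfold bbcStep
            rw [if_neg (not_le.2 hv), if_neg (not_lt.2 hlt), hb]
            exact if_pos hcond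
          rw [hstep]
          refine ⟨h0, ?_, by omega, ?_⟩
          · intro q hq
            rcases List.mem_append.1 hq with hq | hq
            · exact hle q hq
            · rw [List.mem_singleton] at hq; subst hq
              exact hlt
          · intro _
            refine ⟨k, rfl, List.mem_append_right _ (by simp [hcond.1]), ?_⟩
            intro q hq hq2
            rcases List.mem_append.1 hq with hq | hq
            · exact le_of_lt (lt_of_lt_of_le hcond.2 (hbmin q hq hq2))
            · rw [List.mem_singleton] at hq; subst hq
              exact le_rfl
        · have hstep : List.foldl bbcStep s [(k, v)] = s := by
            show bbcStep s (k, v) = s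
            unfold bbcStep
            rw [if_neg (not_le.2 hv), if_neg (not_lt.2 hlt), hb]
            exact if_neg hcond
          rw [hstep]
          refine ⟨h0, ?_, by omega, ?_⟩
          · intro q hq
            rcases List.mem_append.1 hq with hq | hq
            · exact hle q hq
            · rw [List.mem_singleton] at hq; subst hq
              exact hlt
          · intro _
            refine ⟨b, hb, List.mem_append_left _ hbmem, ?_⟩
            intro q hq hq2
            rcases List.mem_append.1 hq with hq | hq
            · exact hbmin q hq hq2
            · rw [List.mem_singleton] at hq; subst hq
              have hv2 : v = s.2 := hq2
              rcases not_and_or.1 hcond with h | h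
              · exact absurd hv2 h
              · exact le_of_not_gt h

theorem best_by_count_py_eq_alt (counts : List (String × Int)) :
    best_by_count_py counts = best_by_count_py_alt counts := by
  by_cases hnil : counts = []
  · subst hnil; rfl
  · obtain ⟨h0, hle, hz, hpos⟩ := bbc_fold_inv counts
    set s := counts.foldl bbcStep (none, 0) with hs
    have hvals : counts.map Prod.snd ≠ [] := by simpa using hnil
    obtain ⟨m, hm⟩ : ∃ m, PySem.List.max? (counts.map Prod.snd) (fun v => v) = some m := by
      cases hmax : PySem.List.max? (counts.map Prod.snd) (fun v => v) with
      | none => exact absurd ((PySem.List.max?_eq_none_iff _ _).1 hmax) hvals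
      | some m => exact ⟨m, rfl⟩
    have hmmem : m ∈ counts.map Prod.snd := PySem.List.max?_mem hm
    have hmmax : ∀ y ∈ counts.map Prod.snd, y ≤ m := by
      intro y hy; simpa using PySem.List.max?_isMax hm y hy
    obtain ⟨pm, hpm, hpm2⟩ := List.mem_map.1 hmmem
    unfold best_by_count_py
    rw [if_neg hnil]
    simp only [if_neg hnil, hm, Option.getD_some]
    by_cases hm0 : m ≤ 0
    · rw [if_pos hm0]
      -- every value ≤ m ≤ 0, so best_val stayed 0 and best_key none
      have hs0 : s.2 = 0 := by
        rcases lt_or_eq_of_le h0 with h | h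
        · obtain ⟨k0, _, hmem, _⟩ := hpos h
          have := hmmax s.2 (List.mem_map.2 ⟨(k0, s.2), hmem, rfl⟩)
          omega
        · omega
      exact (hz hs0).symm
    · push Not at hm0
      rw [if_neg (by omega : ¬ m ≤ 0)]
      have hsm : s.2 = m := by
        have h1 : m ≤ s.2 := by
          have := hle pm hpm; omega
        have hs2 : 0 < s.2 := by omega
        obtain ⟨k0, _, hmem, _⟩ := hpos hs2
        have h2 := hmmax s.2 (List.mem_map.2 ⟨(k0, s.2), hmem, rfl⟩)
        omega
      obtain ⟨k0, hk0, hmem, hmin⟩ := hpos (by omega)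
      -- the filtered key list contains k0, so the sorted list is nonempty
      have hk0keys : k0 ∈ (counts.filter (fun p => decide (p.2 = m))).map Prod.fst := by
        refine List.mem_map.2 ⟨(k0, m), List.mem_filter.2 ⟨by rw [← hsm]; exact hmem, by simp⟩, rfl⟩
      cases hsorted : PySem.List.sorted ((counts.filter (fun p => decide (p.2 = m))).map Prod.fst) (fun k => k) false with
      | nil =>
        exact absurd (by simpa [PySem.List.sorted_eq_nil_iff] using hsorted) (List.ne_nil_of_mem hk0keys)
      | cons b t =>
        have hbk0 : b ≤ k0 := PySem.List.key_head_sorted_le _ _ hsorted k0 hk0keys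
        have hbmem : b ∈ (counts.filter (fun p => decide (p.2 = m))).map Prod.fst := by
          have hmem' : b ∈ PySem.List.sorted ((counts.filter (fun p => decide (p.2 = m))).map Prod.fst) (fun k => k) false := by
            rw [hsorted]; simp
          exact (PySem.List.mem_sorted _ _ _ _).1 hmem'
        obtain ⟨q, hq, hq1⟩ := List.mem_map.1 hbmem
        have hqf := List.mem_filter.1 hq
        have hk0b : k0 ≤ b := by
          rw [← hq1]
          exact hmin q hqf.1 (by rw [hsm]; simpa using hqf.2)
        rw [le_antisymm hbk0 hk0b]
        show some k0 = best_by_count_py_alt counts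
        rw [← hk0]
        rfl

-- ===== VERDICT (by name: the statement is the Claim_ definition above) =====
theorem best_by_count_py_spec : Claim_equal_best_by_count_py := by
  intro counts _
  exact best_by_count_py_eq_alt counts
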